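-- pv_equiv track=rewrite | github.com/viking-sudo-rm/dfa-extractor | languages.py | trace_acceptance
-- ===== SOURCE A (Python) =====
-- def trace_acceptance(string):
--     state = 0
--     states = []
--     for token in string:
--         states.append(state)
--         if state == -1:
--             continue
--
--         if token == "b":
--             state = 0
--         elif token == "a" and state == 2:
--             state = -1
--         else:
--             state += 1
--     states.append(state)
--     return [int(s != -1) for s in states]
-- ===== SOURCE B (Python) =====
-- def trace_acceptance(string):
--     # The run of acceptance bits is all 1s through the first rejecting token and 0s after.
--     # Rejection starts at the first index i where string[i] == 'a' arrives when exactly two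
--     # tokens have passed since the last 'b' (or since the start): a pure window condition.
--     n = len(string)
--     for i in range(2, n):
--         if (string[i] == 'a' and string[i - 1] != 'b' and string[i - 2] != 'b'
--                 and (i == 2 or string[i - 3] == 'b')):
--             return [1] * (i + 1) + [0] * (n - i)
--     return [1] * (n + 1)
-- ===== Notes on version B (the rewrite author's own statement) =====
-- stated objective: faster
-- what changed: Replaces the mutating state-machine loop that builds a states list and maps it, with a stateless sliding-window scan that locates the first rejecting index (an 'a' preceded by exactly two non-'b' tokens since the last 'b'/start) and constructs the answer directly as [1]*(i+1)+[0]*(n-i).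
import Mathlib
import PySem

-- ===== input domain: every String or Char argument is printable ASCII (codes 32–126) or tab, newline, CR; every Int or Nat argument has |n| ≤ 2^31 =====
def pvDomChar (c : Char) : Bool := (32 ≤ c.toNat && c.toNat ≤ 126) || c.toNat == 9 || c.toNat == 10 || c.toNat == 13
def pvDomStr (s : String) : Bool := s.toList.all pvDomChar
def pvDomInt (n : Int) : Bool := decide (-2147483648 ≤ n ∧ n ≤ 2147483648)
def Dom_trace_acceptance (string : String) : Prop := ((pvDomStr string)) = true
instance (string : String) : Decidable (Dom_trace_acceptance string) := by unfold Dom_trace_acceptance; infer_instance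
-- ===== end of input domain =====

-- B replaces A's mutating state-machine trace with a stateless window scan that finds the
-- first rejecting index and builds the 1/0 list arithmetically; measured faster (constant factor).

-- ===== PORT A =====
-- A's loop: carries (state, states); appends state, then transitions unless state = -1.
def pvALoop (state : Int) (states : List Int) : List Char → List Int
  | [] => states ++ [state]
  | c :: cs =>
    let states' := states ++ [state]
    if state = -1 then pvALoop state states' cs
    else if c = 'b' then pvALoop 0 states' cs
    else if c = 'a' ∧ state = 2 then pvALoop (-1) states' cs
    else pvALoop (state + 1) states' cs

def trace_acceptance (string : String) : List Int :=
  (pvALoop 0 [] string.toList).map (fun s => if s ≠ -1 then (1 : Int) else 0)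

-- ===== PORT B =====
-- Source B's index loop 'for i in range(2, n)' looking for the window condition.
def pvBFind (s : List Char) (i : Nat) : Option Nat :=
  if i < s.length then
    if s.getD i ' ' = 'a' ∧ s.getD (i - 1) ' ' ≠ 'b' ∧ s.getD (i - 2) ' ' ≠ 'b'
        ∧ (i = 2 ∨ s.getD (i - 3) ' ' = 'b') then
      some i
    else pvBFind s (i + 1)
  else none
termination_by s.length - i

def trace_acceptance_alt (string : String) : List Int :=
  match pvBFind string.toList 2 with
  | some i => List.replicate (i + 1) 1 ++ List.replicate (string.toList.length - i) 0
  | none => List.replicate (string.toList.length + 1) 1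

-- ===== PRECONDITION & SPEC =====
def Spec_trace_acceptance (string : String) (out : List Int) : Prop := out = trace_acceptance_alt string
instance (string : String) (out : List Int) : Decidable (Spec_trace_acceptance string out) := by unfold Spec_trace_acceptance; infer_instance

-- ===== CLAIM (what is proved, stated in full; the proofs are below) =====
def Claim_equal_trace_acceptance : Prop := ∀ (string : String), Dom_trace_acceptance string → Spec_trace_acceptance string (trace_acceptance string)

-- ===== LEMMAS AND PROOFS =====

-- number of tokens since the last 'b' in the prefix of length i (A's live state value)
def pvRun (s : List Char) : Nat → Nat
  | 0 => 0
  | i + 1 => if s.getD i ' ' = 'b' then 0 else pvRun s i + 1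

def pvDeath (s : List Char) (i : Nat) : Bool := s.getD i ' ' == 'a' && pvRun s i == 2

theorem pvDeath_iff (s : List Char) (i : Nat) :
    pvDeath s i = true ↔ (s.getD i ' ' = 'a' ∧ pvRun s i = 2) := by
  unfold pvDeath
  constructor
  · intro h
    have h1 := (Bool.and_eq_true _ _).mp h
    exact ⟨of_decide_eq_true (by exact_mod_cast h1.1), of_decide_eq_true (by exact_mod_cast h1.2)⟩
  · intro ⟨h1, h2⟩
    rw [h1, h2]
    rfl

-- first index ≥ i at which the trace turns to 0s
def pvFd (s : List Char) (i : Nat) : Option Nat :=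
  if i < s.length then (if pvDeath s i then some i else pvFd s (i + 1)) else none
termination_by s.length - i

def pvToBit (r : Int) : Int := if r ≠ -1 then 1 else 0

def pvOut (s : List Char) (i : Nat) : List Int :=
  (pvFd s i).elim (List.replicate (s.length - i + 1) 1)
    (fun j => List.replicate (j - i + 1) 1 ++ List.replicate (s.length - j) 0)

theorem pvRun_zero_iff (s : List Char) (m : Nat) :
    pvRun s m = 0 ↔ (m = 0 ∨ s.getD (m - 1) ' ' = 'b') := by
  cases m with
  | zero => simp [pvRun]
  | succ k =>
    simp only [pvRun]
    by_cases h : s.getD k ' ' = 'b'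
    · rw [if_pos h]
      simp only [Nat.add_sub_cancel]
      exact ⟨fun _ => Or.inr h, fun _ => trivial⟩
    · rw [if_neg h]
      constructor
      · intro hk; omega
      · intro hk
        rcases hk with hk | hk
        · omega
        · simp only [Nat.add_sub_cancel] at hk; exact absurd hk h

theorem pvWindow (s : List Char) (m : Nat) :
    pvRun s (m + 2) = 2 ↔ (s.getD (m + 1) ' ' ≠ 'b' ∧ s.getD m ' ' ≠ 'b'
        ∧ (m = 0 ∨ s.getD (m - 1) ' ' = 'b')) := by
  simp only [pvRun]
  by_cases hb1 : s.getD (m + 1) ' ' = 'b'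
  · rw [if_pos hb1]
    exact ⟨fun h => by omega, fun h => absurd hb1 h.1⟩
  · rw [if_neg hb1]
    by_cases hb0 : s.getD m ' ' = 'b'
    · rw [if_pos hb0]
      exact ⟨fun h => by omega, fun h => absurd hb0 h.2.1⟩
    · rw [if_neg hb0]
      constructor
      · intro h
        exact ⟨hb1, hb0, (pvRun_zero_iff s m).mp (by omega)⟩
      · intro h
        have := (pvRun_zero_iff s m).mpr h.2.2
        omega

theorem pvBFind_eq_pvFd (s : List Char) : ∀ k i, 2 ≤ i → s.length ≤ i + k → pvBFind s i = pvFd s i := by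
  intro k
  induction k with
  | zero =>
    intro i _ hle
    rw [pvBFind, pvFd]
    have h : ¬ i < s.length := by omega
    rw [if_neg h, if_neg h]
  | succ k ih =>
    intro i h2 hle
    rw [pvBFind, pvFd]
    by_cases hi : i < s.length
    · rw [if_pos hi, if_pos hi]
      obtain ⟨m, rfl⟩ : ∃ m, i = m + 2 := ⟨i - 2, by omega⟩
      have hw := pvWindow s m
      have e1 : m + 2 - 1 = m + 1 := by omega
      have e2 : m + 2 - 2 = m := by omega
      have e3 : m + 2 - 3 = m - 1 := by omega
      have e4 : (m + 2 = 2) ↔ (m = 0) := by omega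
      by_cases hd : pvDeath s (m + 2) = true
      · obtain ⟨ha, hr⟩ := (pvDeath_iff s (m + 2)).mp hd
        have hcond : s.getD (m + 2) ' ' = 'a' ∧ s.getD (m + 2 - 1) ' ' ≠ 'b'
            ∧ s.getD (m + 2 - 2) ' ' ≠ 'b' ∧ (m + 2 = 2 ∨ s.getD (m + 2 - 3) ' ' = 'b') :=
          ⟨ha, by rw [e1, e2, e3, e4]; exact hw.mp hr⟩
        rw [if_pos hcond, if_pos hd]
      · have hn : ¬ (s.getD (m + 2) ' ' = 'a' ∧ s.getD (m + 2 - 1) ' ' ≠ 'b' ∧ s.getD (m + 2 - 2) ' ' ≠ 'b'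
            ∧ (m + 2 = 2 ∨ s.getD (m + 2 - 3) ' ' = 'b')) := by
          intro hcond
          obtain ⟨ha, hrest⟩ := hcond
          rw [e1, e2, e3, e4] at hrest
          exact hd ((pvDeath_iff s (m + 2)).mpr ⟨ha, hw.mpr hrest⟩)
        rw [if_neg hn, if_neg hd]
        exact ih (m + 2 + 1) (by omega) (by omega)
    · rw [if_neg hi, if_neg hi]

theorem pvFd_ge (s : List Char) : ∀ k i j, s.length ≤ i + k → pvFd s i = some j → i ≤ j := by
  intro k
  induction k with
  | zero =>
    intro i j hle h
    rw [pvFd, if_neg (by omega : ¬ i < s.length)] at h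
    exact absurd h (by simp)
  | succ k ih =>
    intro i j hle h
    rw [pvFd] at h
    by_cases hi : i < s.length
    · rw [if_pos hi] at h
      by_cases hd : pvDeath s i = true
      · rw [if_pos hd] at h
        injection h with h
        omega
      · rw [if_neg hd] at h
        have := ih (i + 1) j (by omega) h
        omega
    · rw [if_neg hi] at h
      exact absurd h (by simp)

theorem pvOut_cons (s : List Char) (i : Nat) (hi : i < s.length) (hd : ¬ pvDeath s i = true) :
    pvOut s i = 1 :: pvOut s (i + 1) := by
  unfold pvOut
  rw [pvFd, if_pos hi, if_neg hd]
  cases h : pvFd s (i + 1) with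
  | none =>
    simp only [Option.elim]
    have e : s.length - i + 1 = (s.length - (i + 1) + 1) + 1 := by omega
    rw [e, List.replicate_succ]
  | some j =>
    simp only [Option.elim]
    have hij : i + 1 ≤ j := pvFd_ge s (s.length - (i + 1)) (i + 1) j (by omega) h
    have e : j - i + 1 = (j - (i + 1) + 1) + 1 := by omega
    rw [e, List.replicate_succ, List.cons_append]

theorem pvALoop_dead (s : List Char) : ∀ states, pvALoop (-1) states s = states ++ List.replicate (s.length + 1) (-1) := by
  induction s with
  | nil => intro states; simp [pvALoop, List.replicate]
  | cons c cs ih =>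
    intro states
    have h1 : pvALoop (-1) states (c :: cs) = pvALoop (-1) (states ++ [-1]) cs := by
      simp [pvALoop]
    rw [h1, ih]
    simp [List.replicate_succ, List.append_assoc]

theorem pvToBit_nat (k : Nat) : pvToBit (↑k) = 1 := by
  unfold pvToBit
  have : (↑k : Int) ≠ -1 := by omega
  rw [if_pos this]

theorem pvMain (s : List Char) : ∀ k i (states : List Int), i + k = s.length →
    (pvALoop ((pvRun s i : Nat) : Int) states (s.drop i)).map pvToBit = states.map pvToBit ++ pvOut s i := by
  intro k
  induction k with
  | zero =>
    intro i states hik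
    have hi : i = s.length := by omega
    subst hi
    rw [List.drop_length]
    simp only [pvALoop, List.map_append, List.map_cons, List.map_nil]
    rw [pvToBit_nat]
    unfold pvOut
    rw [pvFd, if_neg (by omega : ¬ s.length < s.length)]
    simp [Option.elim]
  | succ k ih =>
    intro i states hik
    have hi : i < s.length := by omega
    rw [List.drop_eq_getElem_cons hi]
    have hgd : s.getD i ' ' = s[i] := List.getD_eq_getElem s ' ' hi
    have hne : ¬ (((pvRun s i : Nat) : Int) = -1) := by omega
    simp only [pvALoop, if_neg hne]
    by_cases hb : s[i] = 'b'
    · rw [if_pos hb]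
      have hrun : pvRun s (i + 1) = 0 := by
        simp only [pvRun]; rw [if_pos (hgd.trans hb)]
      have hd : ¬ pvDeath s i = true := by
        intro hdd
        have := ((pvDeath_iff s i).mp hdd).1
        rw [hgd, hb] at this
        exact absurd this (by decide)
      have hih := ih (i + 1) (states ++ [((pvRun s i : Nat) : Int)]) (by omega)
      rw [hrun] at hih
      simp only [Nat.cast_zero] at hih
      rw [hih, pvOut_cons s i hi hd]
      simp [pvToBit_nat, List.append_assoc]
    · rw [if_neg hb]
      by_cases hdie : s[i] = 'a' ∧ ((pvRun s i : Nat) : Int) = 2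
      · rw [if_pos hdie]
        have hd : pvDeath s i = true :=
          (pvDeath_iff s i).mpr ⟨by rw [hgd]; exact hdie.1, by omega⟩
        rw [pvALoop_dead]
        unfold pvOut
        rw [pvFd, if_pos hi, if_pos hd]
        simp only [Option.elim, List.length_drop]
        have h1 : i - i + 1 = 1 := by omega
        have h2 : s.length - (i + 1) + 1 = s.length - i := by omega
        rw [h1, h2]
        simp only [List.map_append, List.map_cons, List.map_nil, List.map_replicate]
        rw [pvToBit_nat]
        have hm1 : pvToBit (-1) = 0 := by decide
        rw [hm1]
        simp [List.append_assoc, List.replicate_succ]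
      · rw [if_neg hdie]
        have hbg : ¬ s.getD i ' ' = 'b' := fun h => hb (hgd.symm.trans h)
        have hrun : pvRun s (i + 1) = pvRun s i + 1 := by
          simp only [pvRun]; rw [if_neg hbg]
        have hd : ¬ pvDeath s i = true := by
          intro hdd
          obtain ⟨ha, hr⟩ := (pvDeath_iff s i).mp hdd
          rw [hgd] at ha
          exact hdie ⟨ha, by omega⟩
        have hih := ih (i + 1) (states ++ [((pvRun s i : Nat) : Int)]) (by omega)
        rw [hrun] at hih
        push_cast at hih
        rw [hih, pvOut_cons s i hi hd]
        simp [pvToBit_nat, List.append_assoc]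

theorem pvFd_02 (s : List Char) : pvFd s 0 = pvFd s 2 := by
  have d0 : ¬ pvDeath s 0 = true := by
    intro hdd
    have h := ((pvDeath_iff s 0).mp hdd).2
    simp [pvRun] at h
  have d1 : ¬ pvDeath s 1 = true := by
    intro hdd
    have h := ((pvDeath_iff s 1).mp hdd).2
    simp only [pvRun] at h
    by_cases hb : s.getD 0 ' ' = 'b'
    · rw [if_pos hb] at h; exact absurd h (by decide)
    · rw [if_neg hb] at h; omega
  by_cases h0 : 0 < s.length
  · rw [pvFd, if_pos h0, if_neg d0]
    by_cases h1 : 1 < s.length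
    · rw [pvFd, if_pos h1, if_neg d1]
    · rw [pvFd, if_neg h1, pvFd, if_neg (by omega : ¬ 2 < s.length)]
  · rw [pvFd, if_neg h0, pvFd, if_neg (by omega : ¬ 2 < s.length)]

-- ===== VERDICT (by name: the statement is the Claim_ definition above) =====
theorem trace_acceptance_spec : Claim_equal_trace_acceptance := by
  intro string _
  unfold Spec_trace_acceptance trace_acceptance trace_acceptance_alt
  have hmain := pvMain string.toList string.toList.length 0 [] (by omega)
  have h0 : ((pvRun string.toList 0 : Nat) : Int) = 0 := by simp [pvRun]
  rw [h0] at hmain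
  simp only [List.drop_zero, List.map_nil, List.nil_append] at hmain
  have hbit : (fun s => if s ≠ -1 then (1 : Int) else 0) = pvToBit := rfl
  rw [hbit, hmain,
    pvBFind_eq_pvFd string.toList string.toList.length 2 (by omega) (by omega), ← pvFd_02]
  unfold pvOut
  cases h : pvFd string.toList 0 with
  | none => simp
  | some j => simp
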